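-- pv_equiv track=rewrite | github.com/camiloricoe/python-camilo | CodeSignal/Arcade/The Core/33-Candles.py | solution
-- ===== SOURCE A (Python) =====
-- def solution(solutionNumber, makeNew):
--     burned = parts = 0
--     available = solutionNumber
--     while available > 0:
--         burned += 1
--         available -= 1
--         parts += 1
--         if parts == makeNew:
--             parts = 0
--             available += 1
--     return burned
-- ===== SOURCE B (Python) =====
-- def solution(solutionNumber, makeNew):
--     # Closed form: burning n candles, every makeNew stubs make one new candle.
--     if solutionNumber <= 0:
--         return 0
--     if makeNew <= 0:
--         return solutionNumber
--     return solutionNumber + (solutionNumber - 1) // (makeNew - 1)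
-- ===== Notes on version B (the rewrite author's own statement) =====
-- stated objective: faster
-- what changed: Replaces the step-by-step burning simulation loop by the closed-form count solutionNumber + (solutionNumber-1)//(makeNew-1) (with trivial cases for non-positive inputs); Pre_ excludes makeNew == 1 with solutionNumber > 0, where A loops forever and B raises ZeroDivisionError.
import Mathlib
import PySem

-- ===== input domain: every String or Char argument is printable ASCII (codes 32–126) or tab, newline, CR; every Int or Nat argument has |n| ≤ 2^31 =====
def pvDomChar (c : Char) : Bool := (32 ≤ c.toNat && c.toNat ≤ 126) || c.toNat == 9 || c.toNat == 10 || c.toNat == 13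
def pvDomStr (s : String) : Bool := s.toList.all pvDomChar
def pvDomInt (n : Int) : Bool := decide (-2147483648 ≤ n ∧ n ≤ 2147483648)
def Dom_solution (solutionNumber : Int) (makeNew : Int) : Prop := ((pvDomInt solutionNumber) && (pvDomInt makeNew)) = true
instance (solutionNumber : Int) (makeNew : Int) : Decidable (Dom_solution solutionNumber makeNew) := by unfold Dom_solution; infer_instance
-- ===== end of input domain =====

-- B replaces A's per-candle simulation loop by the O(1) closed form n + (n-1)//(makeNew-1);
-- Pre_ excludes makeNew = 1 with solutionNumber > 0, where A loops forever (B raises ZeroDivisionError there).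


-- ===== PORT A =====
-- literal port of A's while-loop; fuel only makes the loop total (on Pre_ it is never exhausted)
def solutionLoop (fuel : Nat) (burned : Int) (parts : Int) (available : Int) (makeNew : Int) : Int :=
  match fuel with
  | 0 => burned
  | fuel + 1 =>
    if available > 0 then
      let burned := burned + 1
      let available := available - 1
      let parts := parts + 1
      if parts = makeNew then
        solutionLoop fuel burned 0 (available + 1) makeNew
      else
        solutionLoop fuel burned parts available makeNew
    else burned

def solution (solutionNumber : Int) (makeNew : Int) : Int :=
  solutionLoop ((2 * solutionNumber).toNat + 1) 0 0 solutionNumber makeNew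

-- ===== PORT B =====
def solution_alt (solutionNumber : Int) (makeNew : Int) : Int :=
  if solutionNumber ≤ 0 then 0
  else if makeNew ≤ 0 then solutionNumber
  else solutionNumber + PySem.Int.floordiv (solutionNumber - 1) (makeNew - 1)

-- ===== PRECONDITION & SPEC =====
-- Pre_ excludes exactly the inputs where A's loop never terminates (makeNew = 1 with a positive candle count).
def Pre_solution (solutionNumber : Int) (makeNew : Int) : Prop :=
  ¬ (0 < solutionNumber ∧ makeNew = 1)
instance (solutionNumber : Int) (makeNew : Int) : Decidable (Pre_solution solutionNumber makeNew) := by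
  unfold Pre_solution; infer_instance

def pvWitness_solution : Int × Int := (7, 3)

def Spec_solution (solutionNumber : Int) (makeNew : Int) (out : Int) : Prop := out = solution_alt solutionNumber makeNew
instance (solutionNumber : Int) (makeNew : Int) (out : Int) : Decidable (Spec_solution solutionNumber makeNew out) := by unfold Spec_solution; infer_instance

-- ===== CLAIM (what is proved, stated in full; the proofs are below) =====
def Claim_equal_solution : Prop := ∀ (solutionNumber : Int) (makeNew : Int), Dom_solution solutionNumber makeNew → Pre_solution solutionNumber makeNew → Spec_solution solutionNumber makeNew (solution solutionNumber makeNew)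

-- ===== LEMMAS AND PROOFS =====

-- total burns from loop state (available, parts): 0 once no candle is left, else a + (a-1+p)/(m-1)
def burnsF (a p m : Int) : Int := if a ≤ 0 then 0 else a + (a - 1 + p) / (m - 1)

lemma burnsF_nonneg (a p m : Int) (hm : 2 ≤ m) (hp : 0 ≤ p) : 0 ≤ burnsF a p m := by
  unfold burnsF
  split_ifs with h
  · exact le_refl 0
  · have : 0 ≤ (a - 1 + p) / (m - 1) := Int.ediv_nonneg (by omega) (by omega)
    omega

lemma loop_m2 : ∀ (fuel : Nat) (b p a m : Int), 2 ≤ m → 0 ≤ p → p < m →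
    burnsF a p m ≤ (fuel : Int) →
    solutionLoop fuel b p a m = b + burnsF a p m := by
  intro fuel
  induction fuel with
  | zero =>
    intro b p a m hm hp hpm hf
    have h0 : 0 ≤ burnsF a p m := burnsF_nonneg a p m hm hp
    have hb0 : burnsF a p m = 0 := by omega
    by_cases ha : a > 0
    · exfalso
      have : 0 ≤ (a - 1 + p) / (m - 1) := Int.ediv_nonneg (by omega) (by omega)
      unfold burnsF at hb0
      rw [if_neg (by omega)] at hb0
      omega
    · simp [solutionLoop, hb0]
  | succ fuel ih =>
    intro b p a m hm hp hpm hf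
    by_cases ha : a > 0
    · simp only [solutionLoop, if_pos ha]
      by_cases hpm1 : p + 1 = m
      · rw [if_pos hpm1]
        -- state becomes (a, 0); burnsF a (m-1) m = 1 + burnsF a 0 m
        have hstep : burnsF a p m = 1 + burnsF a 0 m := by
          unfold burnsF
          rw [if_neg (by omega), if_neg (by omega)]
          have := Int.add_mul_ediv_right (a - 1) 1 (show m - 1 ≠ 0 by omega)
          have hnum : a - 1 + p = a - 1 + 1 * (m - 1) := by omega
          rw [hnum, this]
          ring_nf
        have ha' : a - 1 + 1 = a := by omega
        rw [ha', ih (b + 1) 0 a m hm (le_refl 0) (by omega) (by omega)]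
        omega
      · rw [if_neg hpm1]
        -- state becomes (a-1, p+1); burnsF a p m = 1 + burnsF (a-1) (p+1) m
        have hstep : burnsF a p m = 1 + burnsF (a - 1) (p + 1) m := by
          unfold burnsF
          by_cases ha1 : a = 1
          · rw [if_neg (by omega), if_pos (by omega)]
            have hdz : (a - 1 + p) / (m - 1) = 0 :=
              Int.ediv_eq_zero_of_lt (by omega) (by omega)
            omega
          · rw [if_neg (by omega), if_neg (by omega)]
            have : a - 1 + p = a - 1 - 1 + (p + 1) := by omega
            rw [this]
            ring_nf
        rw [ih (b + 1) (p + 1) (a - 1) m hm (by omega) (by omega) (by omega)]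
        omega
    · have hb0 : burnsF a p m = 0 := by unfold burnsF; rw [if_pos (by omega)]
      simp [solutionLoop, ha, hb0]

lemma loop_mle0 : ∀ (fuel : Nat) (b p a m : Int), m ≤ 0 → 0 ≤ p → a ≤ (fuel : Int) →
    solutionLoop fuel b p a m = b + max a 0 := by
  intro fuel
  induction fuel with
  | zero =>
    intro b p a m hm hp hf
    simp only [solutionLoop]
    omega
  | succ fuel ih =>
    intro b p a m hm hp hf
    by_cases ha : a > 0
    · simp only [solutionLoop, if_pos ha]
      rw [if_neg (by omega)]
      rw [ih (b + 1) (p + 1) (a - 1) m hm (by omega) (by omega)]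
      omega
    · simp only [solutionLoop, if_neg ha]
      omega

-- ===== VERDICT (by name: the statement is the Claim_ definition above) =====
theorem solution_spec : Claim_equal_solution := by
  intro n m _ hpre
  unfold Spec_solution solution solution_alt
  by_cases hn : n ≤ 0
  · -- loop body never runs
    simp only [solutionLoop, if_neg (by omega : ¬ n > 0), if_pos hn]
  · rw [if_neg hn]
    by_cases hm : m ≤ 0
    · rw [if_pos hm]
      rw [loop_mle0 _ 0 0 n m hm (le_refl 0) (by omega)]
      omega
    · -- m ≥ 1; m = 1 excluded by Pre_, so 2 ≤ m
      have hm2 : 2 ≤ m := by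
        unfold Pre_solution at hpre
        omega
      rw [if_neg hm]
      have hdle : (n - 1 + 0) / (m - 1) ≤ n - 1 := by
        calc (n - 1 + 0) / (m - 1) ≤ n - 1 + 0 := Int.ediv_le_self _ (by omega)
        _ = n - 1 := by omega
      have hdnn : 0 ≤ (n - 1 + 0) / (m - 1) := Int.ediv_nonneg (by omega) (by omega)
      have hfuel : burnsF n 0 m ≤ (((2 * n).toNat + 1 : Nat) : Int) := by
        unfold burnsF
        rw [if_neg (by omega)]
        omega
      rw [loop_m2 _ 0 0 n m hm2 (le_refl 0) (by omega) hfuel]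
      unfold burnsF
      rw [if_neg (by omega),
          PySem.Int.floordiv_eq_ediv_of_pos (by omega : (0:Int) < m - 1)]
      norm_num
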